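-- pv_equiv track=rewrite | github.com/projectstardust25/project-stardust | split_convo.py | slice_messages
-- ===== SOURCE A (Python) =====
-- def slice_messages(messages, splits, default_name="slice"):
--     if not splits:
--         return [("whole", 0, len(messages))]
--     ranges = []
--     prev = 0
--     for sidx, name in splits:
--         if sidx > prev:
--             ranges.append(((name or default_name), prev, sidx))
--         prev = sidx + 1  # drop marker message
--     if prev < len(messages):
--         ranges.append((default_name, prev, len(messages)))
--     counts = {}
--     named = []
--     for base, a, b in ranges:
--         counts[base] = counts.get(base, 0) + 1
--         suffix = "" if counts[base] == 1 else f"-{counts[base]}"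
--         named.append((f"{base}{suffix}", a, b))
--     return named
-- ===== SOURCE B (Python) =====
-- def slice_messages(messages, splits, default_name="slice"):
--     if not splits:
--         return [("whole", 0, len(messages))]
--
--     # Recursive decomposition; repeated labels are disambiguated by counting
--     # occurrences in a 'seen' list instead of a running counts dict.
--     def ranges(prev, rest):
--         if not rest:
--             return [(default_name, prev, len(messages))] if prev < len(messages) else []
--         sidx, name = rest[0]
--         head = [((name or default_name), prev, sidx)] if sidx > prev else []
--         return head + ranges(sidx + 1, rest[1:])
--
--     def rename(seen, rest):
--         if not rest:
--             return []
--         base, a, b = rest[0]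
--         k = seen.count(base) + 1
--         label = base if k == 1 else f"{base}-{k}"
--         return [(label, a, b)] + rename(seen + [base], rest[1:])
--
--     return rename([], ranges(0, splits))
-- ===== Notes on version B (the rewrite author's own statement) =====
-- stated objective: alternative
-- what changed: Replaces A's imperative accumulator loops and counts dict by two recursive functions: ranges() builds the segments by structural recursion on splits, and rename() disambiguates duplicate labels by counting occurrences of the base in a growing 'seen' list (no dict at all).
import Mathlib
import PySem

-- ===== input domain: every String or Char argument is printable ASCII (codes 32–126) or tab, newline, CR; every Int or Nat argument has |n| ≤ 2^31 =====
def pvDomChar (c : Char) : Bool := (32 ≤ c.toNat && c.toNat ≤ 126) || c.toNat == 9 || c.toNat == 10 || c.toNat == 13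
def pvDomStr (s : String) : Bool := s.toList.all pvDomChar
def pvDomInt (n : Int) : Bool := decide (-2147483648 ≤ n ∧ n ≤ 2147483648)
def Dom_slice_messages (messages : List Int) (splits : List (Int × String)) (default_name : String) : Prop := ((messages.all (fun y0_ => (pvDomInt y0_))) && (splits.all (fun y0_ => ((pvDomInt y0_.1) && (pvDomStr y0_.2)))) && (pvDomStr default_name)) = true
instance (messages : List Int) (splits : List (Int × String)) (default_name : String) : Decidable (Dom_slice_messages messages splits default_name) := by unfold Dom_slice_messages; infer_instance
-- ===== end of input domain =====

-- B replaces A's accumulator loops and counts dict by structural recursion plus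
-- prefix counting in a 'seen' list; objective: alternative (same result, no dict).

-- ===== PORT A =====
-- naming step of A's second loop (counts dict + suffix)
def pvNameStep (st : PySem.Dict String Int × List (String × Int × Int))
    (r : String × Int × Int) : PySem.Dict String Int × List (String × Int × Int) :=
  let counts := st.1
  let base := r.1
  let c := counts.getD base 0 + 1
  let counts' := counts.insert base c
  let suffix := if c = 1 then "" else "-" ++ PySem.Int.toStr c
  (counts', st.2 ++ [(base ++ suffix, r.2.1, r.2.2)])

def slice_messages (messages : List Int) (splits : List (Int × String)) (default_name : String) : List (String × Int × Int) :=
  if splits = [] then [("whole", 0, (messages.length : Int))]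
  else
    let st := splits.foldl
      (fun (st : List (String × Int × Int) × Int) p =>
        let ranges := if p.1 > st.2 then st.1 ++ [((if p.2 = "" then default_name else p.2), st.2, p.1)] else st.1
        (ranges, p.1 + 1)) ([], 0)
    let ranges := if st.2 < (messages.length : Int) then st.1 ++ [(default_name, st.2, (messages.length : Int))] else st.1
    (ranges.foldl pvNameStep (PySem.Dict.empty, [])).2

-- ===== PORT B =====
-- Source B's ranges(prev, rest): structural recursion on the split list
def pvRanges (L : Int) (default_name : String) : Int → List (Int × String) → List (String × Int × Int)
  | prev, [] => if prev < L then [(default_name, prev, L)] else []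
  | prev, (sidx, name) :: tail =>
      (if sidx > prev then [((if name = "" then default_name else name), prev, sidx)] else [])
      ++ pvRanges L default_name (sidx + 1) tail

-- Source B's rename(seen, rest): suffix from counting the base in the seen list
def pvRename (default_name : String) : List String → List (String × Int × Int) → List (String × Int × Int)
  | _, [] => []
  | seen, (base, a, b) :: rest =>
      let k := (seen.count base : Int) + 1
      ((if k = 1 then base else base ++ "-" ++ PySem.Int.toStr k), a, b)
        :: pvRename default_name (seen ++ [base]) rest

def slice_messages_alt (messages : List Int) (splits : List (Int × String)) (default_name : String) : List (String × Int × Int) :=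
  if splits = [] then [("whole", 0, (messages.length : Int))]
  else pvRename default_name [] (pvRanges (messages.length : Int) default_name 0 splits)

-- ===== PRECONDITION & SPEC =====
def Spec_slice_messages (messages : List Int) (splits : List (Int × String)) (default_name : String) (out : List (String × Int × Int)) : Prop := out = slice_messages_alt messages splits default_name
instance (messages : List Int) (splits : List (Int × String)) (default_name : String) (out : List (String × Int × Int)) : Decidable (Spec_slice_messages messages splits default_name out) := by unfold Spec_slice_messages; infer_instance

-- ===== CLAIM =====
def Claim_equal_slice_messages : Prop := ∀ (messages : List Int) (splits : List (Int × String)) (default_name : String), Dom_slice_messages messages splits default_name → Spec_slice_messages messages splits default_name (slice_messages messages splits default_name)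

-- ===== LEMMAS AND PROOFS =====

-- A's first loop with its trailing-tail branch builds exactly B's recursive range list.
theorem rangesA_eq_pvRanges (default_name : String) (L : Int)
    (splits : List (Int × String)) (prev : Int) (acc : List (String × Int × Int)) :
    (if (splits.foldl
          (fun (st : List (String × Int × Int) × Int) p =>
            ((if p.1 > st.2 then st.1 ++ [((if p.2 = "" then default_name else p.2), st.2, p.1)] else st.1),
             p.1 + 1)) (acc, prev)).2 < L
      then (splits.foldl
          (fun (st : List (String × Int × Int) × Int) p =>
            ((if p.1 > st.2 then st.1 ++ [((if p.2 = "" then default_name else p.2), st.2, p.1)] else st.1),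
             p.1 + 1)) (acc, prev)).1
        ++ [(default_name,
             (splits.foldl
               (fun (st : List (String × Int × Int) × Int) p =>
                 ((if p.1 > st.2 then st.1 ++ [((if p.2 = "" then default_name else p.2), st.2, p.1)] else st.1),
                  p.1 + 1)) (acc, prev)).2, L)]
      else (splits.foldl
          (fun (st : List (String × Int × Int) × Int) p =>
            ((if p.1 > st.2 then st.1 ++ [((if p.2 = "" then default_name else p.2), st.2, p.1)] else st.1),
             p.1 + 1)) (acc, prev)).1)
    = acc ++ pvRanges L default_name prev splits := by
  induction splits generalizing prev acc with
  | nil =>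
      by_cases h : prev < L
      · simp [List.foldl, pvRanges, h]
      · simp [List.foldl, pvRanges, h]
  | cons p t ih =>
      by_cases h : p.1 > prev
      · simpa [List.foldl, pvRanges, h]
          using ih (p.1 + 1) (acc ++ [((if p.2 = "" then default_name else p.2), prev, p.1)])
      · simpa [List.foldl, pvRanges, h] using ih (p.1 + 1) acc

-- A's dict-based naming fold equals B's seen-list renaming, under the invariant
-- that the dict stores exactly the occurrence counts of the seen list.
theorem nameFold_eq_rename (default_name : String)
    (l : List (String × Int × Int)) (d : PySem.Dict String Int)
    (acc : List (String × Int × Int)) (seen : List String)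
    (hinv : ∀ b : String, d.getD b 0 = (seen.count b : Int)) :
    (l.foldl pvNameStep (d, acc)).2 = acc ++ pvRename default_name seen l := by
  induction l generalizing d acc seen with
  | nil => simp [pvRename]
  | cons r t ih =>
      obtain ⟨base, a, b⟩ := r
      have hk : d.getD base 0 + 1 = (seen.count base : Int) + 1 := by rw [hinv]
      rw [List.foldl_cons]
      have hstep : pvNameStep (d, acc) (base, a, b)
          = (d.insert base ((seen.count base : Int) + 1),
             acc ++ [((if (seen.count base : Int) + 1 = 1 then base
                       else base ++ "-" ++ PySem.Int.toStr ((seen.count base : Int) + 1)), a, b)]) := by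
        simp only [pvNameStep, hk]
        split_ifs <;> simp [String.append_assoc]
      rw [hstep, ih _ _ (seen ++ [base])]
      · simp [pvRename]
      · intro x
        rw [PySem.Dict.getD_insert]
        by_cases hx : x = base
        · simp [hx, List.count_append]
        · simp [hx, List.count_append, List.count_singleton, hinv x]
          exact fun h => hx h.symm

-- ===== VERDICT =====
theorem slice_messages_spec : Claim_equal_slice_messages := by
  intro messages splits default_name _
  unfold Spec_slice_messages slice_messages slice_messages_alt
  by_cases hs : splits = []
  · simp [hs]
  · simp only [if_neg hs]
    rw [nameFold_eq_rename default_name _ _ _ [] (by intro b; simp [PySem.Dict.getD])]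
    rw [rangesA_eq_pvRanges default_name (messages.length : Int) splits 0 []]
    simp
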